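-- pv_equiv track=rewrite | github.com/yongunt/problems | vowel_skewers/vowel_skewers.py | skewer_count
-- ===== SOURCE A (Python) =====
-- from string import ascii_lowercase as ALPHABET
--
-- def skewer_count(seq:str) -> bool:
--     skewer_count:int = 0
--     holder:list = []
--
--     for i in range(len(seq)):
--         if seq[i].lower() in ALPHABET:
--             for j in range(i + 1, len(seq)):
--                 if seq[j] == '-': skewer_count+=1
--                 if seq[j].lower() in ALPHABET:
--                     holder.append(skewer_count)
--                     skewer_count = 0
--                     break
--
--     for i in holder[1::]:
--         if holder[0] != i: return False
--
--     return True
-- ===== SOURCE B (Python) =====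
-- from string import ascii_lowercase as ALPHABET
--
-- def skewer_count(seq: str) -> bool:
--     # single streaming pass: collect the dash-run length between consecutive letters
--     cnt = None          # None until the first letter has been seen
--     gaps = []
--     for c in seq:
--         if c.lower() in ALPHABET:
--             if cnt is not None:
--                 gaps.append(cnt)
--             cnt = 0
--         elif c == '-' and cnt is not None:
--             cnt += 1
--     return len(set(gaps)) <= 1
-- ===== Notes on version B (the rewrite author's own statement) =====
-- stated objective: simpler
-- what changed: Replaces A's nested per-letter forward rescans and the compare-against-holder[0] loop by one streaming pass that accumulates each inter-letter dash count, finishing with len(set(gaps)) <= 1.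
import Mathlib
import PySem

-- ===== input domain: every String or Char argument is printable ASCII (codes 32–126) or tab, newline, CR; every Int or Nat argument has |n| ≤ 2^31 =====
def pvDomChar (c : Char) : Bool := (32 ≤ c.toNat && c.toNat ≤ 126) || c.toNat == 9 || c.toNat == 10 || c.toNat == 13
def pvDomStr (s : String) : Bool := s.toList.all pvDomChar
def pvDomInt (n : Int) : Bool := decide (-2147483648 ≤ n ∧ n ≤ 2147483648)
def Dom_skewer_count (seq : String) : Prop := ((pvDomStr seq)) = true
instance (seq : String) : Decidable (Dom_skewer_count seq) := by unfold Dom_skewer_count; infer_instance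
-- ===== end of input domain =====

-- B rewrites A's nested per-letter rescans as one streaming pass collecting inter-letter dash counts; objective: simpler.

-- ===== PORT A =====
-- seq[i].lower() in ascii_lowercase
def pvIsLetter (c : Char) : Bool := "abcdefghijklmnopqrstuvwxyz".toList.contains (PySem.Chars.lowerChar c)

-- inner j-loop of A: scan forward from the current letter; count '-', stop at the next letter
-- returns (final skewer_count, appended gap if a letter was found)
def pvInnerA : List Char → Int → Int × Option Int
  | [], cnt => (cnt, none)
  | c :: rest, cnt =>
      let cnt := if c = '-' then cnt + 1 else cnt
      if pvIsLetter c then (0, some cnt) else pvInnerA rest cnt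

-- outer i-loop of A over the remaining suffix, carrying (skewer_count, holder)
def pvOuterA : List Char → Int → List Int → List Int
  | [], _, holder => holder
  | c :: rest, cnt, holder =>
      if pvIsLetter c then
        match pvInnerA rest cnt with
        | (cnt', some g) => pvOuterA rest cnt' (holder ++ [g])
        | (cnt', none)   => pvOuterA rest cnt' holder
      else pvOuterA rest cnt holder

-- final loop of A: for i in holder[1::]: if holder[0] != i: return False
def pvLoopA (h : Int) : List Int → Bool
  | [] => true
  | x :: t => if h ≠ x then false else pvLoopA h t

def skewer_count (seq : String) : Bool :=
  let holder := pvOuterA seq.toList 0 []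
  match holder with
  | [] => true
  | h :: t => pvLoopA h t

-- ===== PORT B =====
-- one step of B's for-loop over seq, state (cnt : Option Int, gaps)
def pvStepB (st : Option Int × List Int) (c : Char) : Option Int × List Int :=
  if pvIsLetter c then
    (some 0, match st.1 with | some g => st.2 ++ [g] | none => st.2)
  else if c = '-' then
    (match st.1 with | some g => some (g + 1) | none => none, st.2)
  else st

def skewer_count_alt (seq : String) : Bool :=
  let gaps := (seq.toList.foldl pvStepB (none, [])).2
  decide ((PySem.Set.ofList gaps).length ≤ 1)

-- ===== PRECONDITION & SPEC =====
def Spec_skewer_count (seq : String) (out : Bool) : Prop := out = skewer_count_alt seq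
instance (seq : String) (out : Bool) : Decidable (Spec_skewer_count seq out) := by unfold Spec_skewer_count; infer_instance

-- ===== CLAIM (what is proved, stated in full; the proofs are below) =====
def Claim_equal_skewer_count : Prop := ∀ (seq : String), Dom_skewer_count seq → Spec_skewer_count seq (skewer_count seq)

-- ===== LEMMAS AND PROOFS =====

theorem pvIsLetter_dash : pvIsLetter '-' = false := by decide

-- proof-side characterisation: gaps produced from a state that is already counting (cnt = some k)
def gapsK (k : Int) : List Char → List Int
  | [] => []
  | c :: rest => if pvIsLetter c then k :: gapsK 0 rest
                 else if c = '-' then gapsK (k + 1) rest else gapsK k rest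

-- gaps produced before the first letter (cnt = None)
def gapsN : List Char → List Int
  | [] => []
  | c :: rest => if pvIsLetter c then gapsK 0 rest else gapsN rest

theorem pvStepB_letter {c : Char} (hl : pvIsLetter c = true) (cnt : Option Int) (g : List Int) :
    pvStepB (cnt, g) c = (some 0, match cnt with | some k => g ++ [k] | none => g) := by
  simp [pvStepB, hl]

theorem pvStepB_dash (cnt : Option Int) (g : List Int) :
    pvStepB (cnt, g) '-' = (match cnt with | some k => some (k + 1) | none => none, g) := by
  simp [pvStepB, pvIsLetter_dash]

theorem pvStepB_other {c : Char} (hl : pvIsLetter c = false) (hd : c ≠ '-')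
    (cnt : Option Int) (g : List Int) : pvStepB (cnt, g) c = (cnt, g) := by
  simp [pvStepB, hl, hd]

theorem foldlB_some (cs : List Char) : ∀ (k : Int) (g0 : List Int),
    (cs.foldl pvStepB (some k, g0)).2 = g0 ++ gapsK k cs := by
  induction cs with
  | nil => intro k g0; simp [gapsK]
  | cons c rest ih =>
      intro k g0
      by_cases hl : pvIsLetter c = true
      · rw [List.foldl_cons, pvStepB_letter hl, ih 0 (g0 ++ [k])]
        simp [gapsK, hl]
      · by_cases hd : c = '-'
        · subst hd
          rw [List.foldl_cons, pvStepB_dash, ih (k + 1) g0]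
          simp [gapsK, pvIsLetter_dash]
        · rw [List.foldl_cons, pvStepB_other (Bool.not_eq_true _ ▸ hl) hd, ih k g0]
          simp [gapsK, hl, hd]

theorem foldlB_none (cs : List Char) : ∀ (g0 : List Int),
    (cs.foldl pvStepB (none, g0)).2 = g0 ++ gapsN cs := by
  induction cs with
  | nil => intro g0; simp [gapsN]
  | cons c rest ih =>
      intro g0
      by_cases hl : pvIsLetter c = true
      · rw [List.foldl_cons, pvStepB_letter hl, foldlB_some rest 0 g0]
        simp [gapsN, hl]
      · by_cases hd : c = '-'
        · subst hd
          rw [List.foldl_cons, pvStepB_dash, ih g0]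
          simp [gapsN, pvIsLetter_dash]
        · rw [List.foldl_cons, pvStepB_other (Bool.not_eq_true _ ▸ hl) hd, ih g0]
          simp [gapsN, hl]

theorem innerA_some {cs : List Char} : ∀ {k g : Int},
    (pvInnerA cs k).2 = some g → pvInnerA cs k = (0, some g) := by
  induction cs with
  | nil => intro k g h; simp [pvInnerA] at h
  | cons c rest ih =>
      intro k g h
      by_cases hl : pvIsLetter c = true
      · simp only [pvInnerA, hl, if_true] at h ⊢
        simpa using h
      · simp only [pvInnerA, hl, if_false, Bool.false_eq_true] at h ⊢
        exact ih h

theorem innerA_none {cs : List Char} : ∀ {k : Int},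
    (pvInnerA cs k).2 = none → ∀ c ∈ cs, pvIsLetter c = false := by
  induction cs with
  | nil => intro k _ c hc; simp at hc
  | cons c rest ih =>
      intro k h d hd
      by_cases hl : pvIsLetter c = true
      · simp [pvInnerA, hl] at h
      · simp only [pvInnerA, hl, if_false, Bool.false_eq_true] at h
        rcases List.mem_cons.mp hd with rfl | hd'
        · simpa using hl
        · exact ih h d hd'

theorem outerA_no_letters {cs : List Char} (h : ∀ c ∈ cs, pvIsLetter c = false) :
    ∀ (k : Int) (holder : List Int), pvOuterA cs k holder = holder := by
  induction cs with
  | nil => intro k holder; simp [pvOuterA]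
  | cons c rest ih =>
      intro k holder
      have hc : pvIsLetter c = false := h c (by simp)
      simp only [pvOuterA, hc, Bool.false_eq_true, if_false]
      exact ih (fun d hd => h d (List.mem_cons_of_mem _ hd)) k holder

-- the key link: gapsK read off A's inner scan
theorem gapsK_eq (cs : List Char) : ∀ (k : Int),
    gapsK k cs = match (pvInnerA cs k).2 with
                 | some g => g :: gapsN cs
                 | none => [] := by
  induction cs with
  | nil => intro k; simp [gapsK, pvInnerA]
  | cons c rest ih =>
      intro k
      by_cases hl : pvIsLetter c = true
      · have hcd : c ≠ '-' := by
          intro h; rw [h] at hl; rw [pvIsLetter_dash] at hl; exact Bool.false_ne_true hl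
        simp [gapsK, gapsN, pvInnerA, hl, hcd]
      · by_cases hd : c = '-'
        · subst hd
          simp only [gapsK, gapsN, pvInnerA, pvIsLetter_dash, Bool.false_eq_true, if_false, if_true]

          exact ih (k + 1)
        · simp only [gapsK, gapsN, pvInnerA, hl, hd, Bool.false_eq_true, if_false]
          exact ih k

theorem outerA_eq (cs : List Char) : ∀ (holder : List Int),
    pvOuterA cs 0 holder = holder ++ gapsN cs := by
  induction cs with
  | nil => intro holder; simp [pvOuterA, gapsN]
  | cons c rest ih =>
      intro holder
      by_cases hl : pvIsLetter c = true
      · simp only [pvOuterA, hl, if_true, gapsN]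
        rcases h2 : (pvInnerA rest 0).2 with _ | g
        · have hres : pvInnerA rest 0 = ((pvInnerA rest 0).1, none) := by
            rw [← h2]
          rw [hres]
          show pvOuterA rest (pvInnerA rest 0).1 holder = holder ++ gapsK 0 rest
          rw [outerA_no_letters (innerA_none h2), gapsK_eq, h2]
          simp
        · rw [innerA_some h2]
          show pvOuterA rest 0 (holder ++ [g]) = holder ++ gapsK 0 rest
          rw [ih (holder ++ [g]), gapsK_eq, h2]
          simp
      · simp only [pvOuterA, hl, Bool.false_eq_true, if_false, gapsN]
        exact ih holder

theorem loopA_eq_all (h : Int) (t : List Int) :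
    pvLoopA h t = t.all (fun x => h == x) := by
  induction t with
  | nil => simp [pvLoopA]
  | cons x t ih =>
      simp only [pvLoopA, List.all_cons]
      by_cases hx : h = x
      · subst hx; simp [ih]
      · simp [hx]

theorem foldl_add_no_new (t : List Int) : ∀ (s : List Int) (h : Int), h ∈ s →
    (∀ x ∈ t, x = h) → t.foldl PySem.Set.add s = s := by
  induction t with
  | nil => intro s h _ _; simp
  | cons x t ih =>
      intro s h hs hall
      have hx := hall x (by simp)
      subst hx
      simp only [List.foldl_cons]
      rw [PySem.Set.add, if_pos (by simpa using hs)]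
      exact ih s x hs (fun y hy => hall y (by simp [hy]))

theorem ofList_of_all_eq {h : Int} {t : List Int} (hall : ∀ x ∈ t, x = h) :
    PySem.Set.ofList (h :: t) = [h] := by
  have h0 : PySem.Set.ofList (h :: t) = t.foldl PySem.Set.add [h] := by
    simp [PySem.Set.ofList_eq_foldl, List.foldl, PySem.Set.add]
  rw [h0, foldl_add_no_new t [h] h (by simp) hall]

theorem final_eq (G : List Int) :
    (match G with | [] => true | h :: t => pvLoopA h t)
      = decide ((PySem.Set.ofList G).length ≤ 1) := by
  cases G with
  | nil => decide
  | cons h t =>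
      show pvLoopA h t = decide ((PySem.Set.ofList (h :: t)).length ≤ 1)
      rw [loopA_eq_all]
      by_cases hall : ∀ x ∈ t, x = h
      · rw [ofList_of_all_eq hall]
        simp [List.all_eq_true]
        intro x hx; exact (hall x hx).symm
      · push Not at hall
        obtain ⟨x, hx, hxh⟩ := hall
        have hmem_h : h ∈ PySem.Set.ofList (h :: t) := by
          rw [PySem.Set.mem_ofList]; simp
        have hmem_x : x ∈ PySem.Set.ofList (h :: t) := by
          rw [PySem.Set.mem_ofList]; simp [hx]
        have hlen : 1 < (PySem.Set.ofList (h :: t)).length := by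
          rcases hs : PySem.Set.ofList (h :: t) with _ | ⟨a, _ | ⟨b, l⟩⟩
          · rw [hs] at hmem_h; simp at hmem_h
          · rw [hs] at hmem_h hmem_x
            simp at hmem_h hmem_x
            exact absurd (hmem_x.trans hmem_h.symm) hxh
          · simp only [List.length_cons]; omega
        have hfa : t.all (fun x => h == x) = false := by
          simp only [List.all_eq_false]
          exact ⟨x, hx, by simpa using fun hh => hxh hh.symm⟩
        rw [hfa]
        symm
        simp only [decide_eq_false_iff_not]
        omega

-- ===== VERDICT (by name: the statement is the Claim_ definition above) =====
theorem skewer_count_spec : Claim_equal_skewer_count := by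
  intro seq _
  unfold Spec_skewer_count skewer_count skewer_count_alt
  rw [outerA_eq seq.toList [], foldlB_none seq.toList []]
  simpa using final_eq (gapsN seq.toList)
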